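-- pv_equiv track=rewrite | github.com/casbu/Python-Projects | Puzzle-Based Password Generator/main.py | reverse_left
-- ===== SOURCE A (Python) =====
-- def get_middle_index(puzzle):
--     num_rows = len(puzzle)
--     num_cols = len(puzzle[0]) if num_rows > 0 else 0
--     middle_row_index = num_rows // 2
--     middle_col_index = num_cols // 2
--     return middle_row_index, middle_col_index
--
-- def reverse_left(puzzle):
--     middle_row_index, middle_col_index = get_middle_index(puzzle)
--
--     # establish columns to the left
--     left_columns = []
--     for col in range(middle_col_index):
--         column = [row[col] for row in puzzle]
--         # reverse column vertically
--         left_columns.append(column[::-1])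
--
--     # create new puzzle with reversed columns
--     new_puzzle = []
--     for row in range(len(puzzle)):
--         new_row = []
--         #add reversed columns
--         for col in range(middle_col_index):
--             new_row.append(left_columns[col][row])
--         #add middle column
--         new_row.append(puzzle[row][middle_col_index])
--         #add right column
--         new_row.extend(puzzle[row][middle_col_index + 1:])
--         new_puzzle.append(new_row)
--
--     return new_puzzle
-- ===== SOURCE B (Python) =====
-- def reverse_left(puzzle):
--     n = len(puzzle)
--     mid = (len(puzzle[0]) // 2) if n else 0
--     return [
--         [puzzle[n - 1 - r][c] for c in range(mid)]
--         + [puzzle[r][mid]]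
--         + list(puzzle[r][mid + 1:])
--         for r in range(n)
--     ]
-- ===== Notes on version B (the rewrite author's own statement) =====
-- stated objective: simpler
-- what changed: B drops A's intermediate reversed-left-columns table and second nested loop, building each output row in one comprehension by indexing the source grid directly with the reversed row index n-1-r.
import Mathlib
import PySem

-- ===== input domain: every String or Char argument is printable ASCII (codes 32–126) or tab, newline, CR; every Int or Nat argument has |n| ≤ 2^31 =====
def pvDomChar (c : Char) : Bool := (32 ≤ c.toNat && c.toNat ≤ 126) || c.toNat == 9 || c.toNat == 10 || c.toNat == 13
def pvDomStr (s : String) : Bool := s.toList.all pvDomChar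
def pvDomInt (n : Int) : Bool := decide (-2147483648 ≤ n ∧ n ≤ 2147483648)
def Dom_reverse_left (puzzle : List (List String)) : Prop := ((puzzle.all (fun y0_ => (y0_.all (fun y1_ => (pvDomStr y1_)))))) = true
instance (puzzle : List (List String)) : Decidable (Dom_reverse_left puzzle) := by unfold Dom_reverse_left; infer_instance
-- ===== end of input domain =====

-- B builds each output row in one pass, indexing the source grid directly with the
-- reversed row index n-1-r, instead of A's intermediate reversed-columns table (simpler).

-- ===== PORT A =====
def get_middle_index (puzzle : List (List String)) : Int × Int :=
  let num_rows : Int := puzzle.length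
  let num_cols : Int := if num_rows > 0 then ((puzzle.headD []).length : Int) else 0
  (PySem.Int.floordiv num_rows 2, PySem.Int.floordiv num_cols 2)

def reverse_left (puzzle : List (List String)) : List (List String) :=
  let mid : Int := (get_middle_index puzzle).2
  let left_columns : List (List String) :=
    (PySem.List.pyRange 0 mid 1).map
      (fun col => (puzzle.map (fun row => PySem.List.pyGetD row col "")).reverse)
  (PySem.List.pyRange 0 (puzzle.length : Int) 1).map (fun r =>
    ((PySem.List.pyRange 0 mid 1).map
        (fun col => PySem.List.pyGetD (PySem.List.pyGetD left_columns col []) r ""))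
    ++ [PySem.List.pyGetD (PySem.List.pyGetD puzzle r []) mid ""]
    ++ PySem.List.slice (PySem.List.pyGetD puzzle r []) (some (mid + 1)) none)

-- ===== PORT B =====
def reverse_left_alt (puzzle : List (List String)) : List (List String) :=
  let n := puzzle.length
  let mid : Nat := if n ≠ 0 then (puzzle.headD []).length / 2 else 0
  (List.range n).map (fun r =>
    (List.range mid).map (fun c => ((puzzle.getD (n - 1 - r) []).getD c ""))
    ++ ((puzzle.getD r []).getD mid "") :: ((puzzle.getD r []).drop (mid + 1)))

-- ===== PRECONDITION & SPEC =====
-- Pre_ excludes exactly the inputs where the Python A raises IndexError: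
-- a nonempty puzzle with some row too short to hold the middle column (mid-th) cell.
def Pre_reverse_left (puzzle : List (List String)) : Prop :=
  ∀ row ∈ puzzle, (puzzle.headD []).length / 2 < row.length
instance (puzzle : List (List String)) : Decidable (Pre_reverse_left puzzle) := by
  unfold Pre_reverse_left; infer_instance

def pvWitness_reverse_left : List (List String) :=
  [["a", "b", "c"], ["d", "e", "f"]]

def Spec_reverse_left (puzzle : List (List String)) (out : List (List String)) : Prop := out = reverse_left_alt puzzle
instance (puzzle : List (List String)) (out : List (List String)) : Decidable (Spec_reverse_left puzzle out) := by unfold Spec_reverse_left; infer_instance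

-- ===== CLAIM (what is proved, stated in full; the proofs are below) =====
def Claim_equal_reverse_left : Prop := ∀ (puzzle : List (List String)), Dom_reverse_left puzzle → Pre_reverse_left puzzle → Spec_reverse_left puzzle (reverse_left puzzle)

-- ===== LEMMAS AND PROOFS =====

theorem fd_half (L : Nat) : PySem.Int.floordiv (L : Int) 2 = ((L / 2 : Nat) : Int) := by
  simp [PySem.Int.floordiv, Int.fdiv_eq_ediv]

-- the reversed-left-columns table entry of A equals direct indexing at the mirrored row
theorem left_entry (puzzle : List (List String)) (midN r c : Nat)
    (hr : r < puzzle.length) (hc : c < midN) :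
    PySem.List.pyGetD
      (PySem.List.pyGetD
        (List.map (fun col => (List.map (fun row => PySem.List.pyGetD row col "") puzzle).reverse)
          (List.map (fun k => ((k : Nat) : Int)) (List.range midN)))
        (c : Int) [])
      (r : Int) ""
    = (puzzle.getD (puzzle.length - 1 - r) []).getD c "" := by
  rw [List.map_map]
  simp only [PySem.List.pyGetD_natCast]
  rw [PySem.List.getD_map_range _ _ _ _ hc]
  simp only [Function.comp_apply]
  have hr' : r < (puzzle.map (fun row => PySem.List.pyGetD row (c : Int) "")).reverse.length := by
    simpa using hr
  rw [List.getD_eq_getElem _ _ hr', List.getElem_reverse]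
  have hm : puzzle.length - 1 - r < puzzle.length := by omega
  simp [List.getElem_map, PySem.List.pyGetD_natCast, List.getElem?_eq_getElem hm]

-- ===== VERDICT (by name: the statement is the Claim_ definition above) =====
set_option maxHeartbeats 1000000 in
theorem reverse_left_spec : Claim_equal_reverse_left := by
  intro puzzle _ _
  unfold Spec_reverse_left
  cases puzzle with
  | nil => rfl
  | cons hd tl =>
    show reverse_left (hd :: tl) = reverse_left_alt (hd :: tl)
    simp only [reverse_left, reverse_left_alt, get_middle_index, List.headD_cons]
    have hpos : ((hd :: tl).length : Int) > 0 := by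
      exact_mod_cast (hd :: tl).length_pos_of_ne_nil (by simp)
    rw [if_pos hpos, fd_half hd.length,
      if_pos (show (hd :: tl).length ≠ 0 by simp)]
    rw [PySem.List.pyRange_zero_natCast ((hd :: tl).length), List.map_map]
    apply List.map_congr_left
    intro r hrmem
    have hr : r < (hd :: tl).length := List.mem_range.mp hrmem
    simp only [Function.comp_apply]
    rw [List.append_assoc, List.singleton_append]
    congr 1
    · rw [PySem.List.pyRange_zero_natCast, List.map_map]
      apply List.map_congr_left
      intro c hcmem
      have hc : c < hd.length / 2 := List.mem_range.mp hcmem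
      simp only [Function.comp_apply]
      exact left_entry (hd :: tl) (hd.length / 2) r c hr hc
    · congr 1
      · simp only [PySem.List.pyGetD_natCast]
      · have : ((hd.length / 2 : Nat) : Int) + 1 = (((hd.length / 2 + 1 : Nat)) : Int) := by
          push_cast; ring
        rw [PySem.List.pyGetD_natCast, this, PySem.List.slice_from_natCast]
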